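-- pv_equiv track=rewrite | github.com/rishav98sin-max/applysmart-ai | agents/cover_letter_generator.py | _cover_letter_is_complete
-- ===== SOURCE A (Python) =====
-- _TRUNCATION_TRAILERS = (
--     " and", " or", " but", " with", " for", " to", " of", " in", " by",
--     " that", " which", " while", " when", " where", " as", " a", " an", " the",
--     " from", " on", " into",
-- )
--
-- def _cover_letter_is_complete(body: str) -> bool:
--     """
--     Return False when the body looks truncated — too short, ends mid-word,
--     or trails off on a connective word. These letters would otherwise ship
--     as a 2-line stub like the AIB case in the April 22 run.
--     """
--     if not body:
--         return False
--     stripped = body.strip()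
--     if len(stripped) < 500:
--         return False  # <~80 words — always too short for a 340-400 word letter
--
--     word_count = len(stripped.split())
--     if word_count < 140:
--         return False
--
--     # Last non-whitespace char should be sentence-ending punctuation.
--     if stripped[-1] not in ".!?\"'":
--         return False
--
--     # Reject endings that trail off on connectives (e.g. "... customers and").
--     lower = stripped.lower()
--     for trailer in _TRUNCATION_TRAILERS:
--         if lower.endswith(trailer) or lower.endswith(trailer + "."):
--             return False
--
--     return True
-- ===== SOURCE B (Python) =====
-- _CONNECTIVES = frozenset({
--     "and", "or", "but", "with", "for", "to", "of", "in", "by",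
--     "that", "which", "while", "when", "where", "as", "a", "an", "the",
--     "from", "on", "into",
-- })
--
--
-- def _cover_letter_is_complete(body: str) -> bool:
--     stripped = body.strip()
--     if len(stripped) < 500 or len(stripped.split()) < 140:
--         return False  # empty/short bodies (incl. body == "") are too short
--     last = stripped[-1]
--     if last not in ".!?\"'":
--         return False
--     if last == '.':
--         # word after the last literal space, period stripped, lowercased
--         tail = stripped[:-1].rpartition(' ')[2].lower()
--         if tail in _CONNECTIVES:
--             return False
--     return True
-- ===== Notes on version B (the rewrite author's own statement) =====
-- stated objective: simpler
-- what changed: The 21-iteration trailer loop with 42 endswith scans over the lowercased letter is replaced by a single last-token test: only when the last character is a period is the word after the last literal space (rpartition on stripped[:-1]) lowercased and looked up in a frozenset of connectives; the whole-string lower() and the separate empty-body guard disappear (the endswith-without-period arm of A is dead after the punctuation guard, and len<500 subsumes emptiness).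
import Mathlib
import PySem

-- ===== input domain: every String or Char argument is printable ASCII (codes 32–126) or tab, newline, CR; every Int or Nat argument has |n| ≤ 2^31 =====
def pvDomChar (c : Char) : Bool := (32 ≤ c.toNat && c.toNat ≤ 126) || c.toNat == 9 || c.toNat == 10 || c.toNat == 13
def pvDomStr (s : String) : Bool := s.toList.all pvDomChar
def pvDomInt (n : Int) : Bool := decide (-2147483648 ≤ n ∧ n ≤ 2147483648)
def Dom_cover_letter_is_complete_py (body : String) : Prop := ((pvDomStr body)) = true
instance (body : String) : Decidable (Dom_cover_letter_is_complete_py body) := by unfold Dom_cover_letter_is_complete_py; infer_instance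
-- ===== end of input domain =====

-- B replaces A's 21-trailer endswith loop (and the whole-string lower) by one last-token lookup:
-- only in the period-ending branch is the word after the last space lowercased and checked; simpler.

-- ===== PORT A =====
-- the module constant _TRUNCATION_TRAILERS (a tuple of strings)
def pvTrailers : List String :=
  [" and", " or", " but", " with", " for", " to", " of", " in", " by",
   " that", " which", " while", " when", " where", " as", " a", " an", " the",
   " from", " on", " into"]

def cover_letter_is_complete_py (body : String) : Bool :=
  if body = "" then false
  else
    let stripped := PySem.Str.strip body
    if PySem.Str.len stripped < 500 then false
    else if (PySem.Str.split₀ stripped).length < 140 then false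
    else
      match PySem.Str.pyGet? stripped (-1) with
      | none => false      -- unreachable: len(stripped) ≥ 500, so stripped[-1] exists
      | some c =>
        -- `stripped[-1] not in ".!?\"'"`: membership of a single char in a string literal
        if !(['.', '!', '?', '"', '\''].contains c) then false
        else
          let lower := PySem.Str.lower stripped
          -- the for-loop over _TRUNCATION_TRAILERS with early `return False`
          if pvTrailers.any (fun t =>
               PySem.Str.endswith lower t || PySem.Str.endswith lower (t ++ ".")) then false
          else true

-- ===== PORT B =====
-- the module constant _CONNECTIVES (a frozenset of words)
def pvConnectives : List (List Char) :=
  PySem.Set.ofList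
    ["and".toList, "or".toList, "but".toList, "with".toList, "for".toList, "to".toList,
     "of".toList, "in".toList, "by".toList, "that".toList, "which".toList, "while".toList,
     "when".toList, "where".toList, "as".toList, "a".toList, "an".toList, "the".toList,
     "from".toList, "on".toList, "into".toList]

-- hand port of `cs.rpartition(" ")[2]`: the chunk after the LAST literal space
-- (the whole string when there is no space) — exact for every List Char
def pvLastChunk (cs : List Char) : List Char :=
  (cs.reverse.takeWhile (fun c => c ≠ ' ')).reverse

def cover_letter_is_complete_py_alt (body : String) : Bool :=
  -- `stripped` inlined; the guards merged by Python's `or`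
  if PySem.Str.len (PySem.Str.strip body) < 500 ∨
     (PySem.Str.split₀ (PySem.Str.strip body)).length < 140 then false
  else
    match PySem.Str.pyGet? (PySem.Str.strip body) (-1) with
    | none => false      -- unreachable: len(stripped) ≥ 500
    | some last =>
      if !(['.', '!', '?', '"', '\''].contains last) then false
      else if last = '.' then
        -- `stripped[:-1]` is dropLast (exact); then rpartition + per-word lower + set lookup
        !(pvConnectives.contains
            (PySem.Chars.lower (pvLastChunk (PySem.Str.strip body).toList.dropLast)))
      else true

-- ===== PRECONDITION & SPEC =====
def Spec_cover_letter_is_complete_py (body : String) (out : Bool) : Prop := out = cover_letter_is_complete_py_alt body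
instance (body : String) (out : Bool) : Decidable (Spec_cover_letter_is_complete_py body out) := by unfold Spec_cover_letter_is_complete_py; infer_instance

-- ===== CLAIM (what is proved, stated in full; the proofs are below) =====
def Claim_equal_cover_letter_is_complete_py : Prop := ∀ (body : String), Dom_cover_letter_is_complete_py body → Spec_cover_letter_is_complete_py body (cover_letter_is_complete_py body)

-- ===== LEMMAS AND PROOFS =====

-- lowerChar sends no non-space character to the space character
lemma pv_lower_ne_space (c : Char) (h : c ≠ ' ') : PySem.Chars.lowerChar c ≠ ' ' := by
  unfold PySem.Chars.lowerChar
  split_ifs with h1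
  · unfold PySem.Chars.isupper at h1
    simp only [Bool.and_eq_true, decide_eq_true_eq, Char.le_def, UInt32.le_iff_toNat_le] at h1
    have hA : ('A').val.toNat = 65 := rfl
    have hZ : ('Z').val.toNat = 90 := rfl
    have hct : c.toNat = c.val.toNat := rfl
    intro he
    have h2 : (Char.ofNat (c.toNat + 32)).toNat = 32 := by rw [he]; rfl
    rw [Char.toNat_ofNat, if_pos (by unfold Nat.isValidChar; left; omega)] at h2
    omega
  · exact h

-- dropLast commutes with map
lemma pv_map_dropLast (f : Char → Char) (l : List Char) :
    (l.map f).dropLast = l.dropLast.map f := by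
  induction l with
  | nil => simp
  | cons a l ih => cases l <;> simp_all

-- takeWhile commutes with map when the predicate is invariant under the map
lemma pv_takeWhile_map (f : Char → Char) (q : Char → Bool)
    (h : ∀ x, q (f x) = q x) (r : List Char) :
    (r.map f).takeWhile q = (r.takeWhile q).map f := by
  induction r with
  | nil => simp
  | cons a r ih =>
    simp only [List.map_cons, List.takeWhile_cons, h a]
    split_ifs <;> simp [ih]

-- lowercasing commutes with "drop trailing element, take the chunk after the last space"
lemma pv_lastChunk_lower (M : List Char) :
    pvLastChunk (PySem.Chars.lower M).dropLast
      = PySem.Chars.lower (pvLastChunk M.dropLast) := by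
  unfold pvLastChunk PySem.Chars.lower
  have hq : ∀ x, decide (PySem.Chars.lowerChar x ≠ ' ') = decide (x ≠ ' ') := by
    intro x
    by_cases hx : x = ' '
    · subst hx; rfl
    · simp [hx, pv_lower_ne_space x hx]
  rw [pv_map_dropLast, ← List.map_reverse, pv_takeWhile_map _ _ hq, List.map_reverse]

-- takeWhile on (· ≠ ' ') returns exactly v iff v followed by a space is a prefix,
-- provided v is space-free and strictly shorter than the list
lemma pv_takeWhile_eq_iff (r v : List Char) (hv : ∀ x ∈ v, x ≠ ' ')
    (hlen : v.length < r.length) :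
    r.takeWhile (fun c => c ≠ ' ') = v ↔ v ++ [' '] <+: r := by
  induction r generalizing v with
  | nil => simp at hlen
  | cons a r ih =>
    cases v with
    | nil =>
      by_cases ha : a = ' '
      · subst ha
        simp [List.cons_prefix_cons]
      · simp [ha, List.cons_prefix_cons, Ne.symm ha]
    | cons b v =>
      have hb : b ≠ ' ' := hv b (by simp)
      by_cases ha : a = ' '
      · subst ha
        simp only [List.takeWhile_cons, List.cons_append, List.cons_prefix_cons]
        simp [hb, eq_comm]
      · rw [List.takeWhile_cons, if_pos (show ((fun c => decide (c ≠ ' ')) a) = true by simp [ha])]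
        simp only [List.cons_append, List.cons_prefix_cons, List.cons.injEq]
        rw [ih v (fun x hx => hv x (by simp [hx])) (by simpa using hlen)]
        constructor
        · rintro ⟨h1, h2⟩; exact ⟨h1.symm, h2⟩
        · rintro ⟨h1, h2⟩; exact ⟨h1.symm, h2⟩

-- suffix cancellation on a common last element
lemma pv_suffix_concat_iff (l m : List Char) (a : Char) :
    (l ++ [a]) <:+ (m ++ [a]) ↔ l <:+ m := by
  constructor
  · intro h
    have := List.reverse_prefix.mpr h
    simp only [List.reverse_append, List.reverse_singleton, List.singleton_append,
      List.cons_prefix_cons] at this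
    exact List.reverse_prefix.mp (by simpa using this.2)
  · rintro ⟨w, rfl⟩
    exact ⟨w, by simp⟩

-- the chunk after the last space equals w iff the list ends in ' '::w (w space-free, shorter)
lemma pv_lastChunk_eq_iff (M w : List Char) (hsp : ∀ x ∈ w, x ≠ ' ')
    (hlen : w.length < M.length) :
    pvLastChunk M = w ↔ (' ' :: w) <:+ M := by
  unfold pvLastChunk
  constructor
  · intro h
    have h' : M.reverse.takeWhile (fun c => c ≠ ' ') = w.reverse := by
      have := congrArg List.reverse h
      simpa using this
    have := (pv_takeWhile_eq_iff M.reverse w.reverse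
      (fun x hx => hsp x (by simpa using hx)) (by simpa using hlen)).mp h'
    have : (' ' :: w).reverse <+: M.reverse := by simpa using this
    exact List.reverse_prefix.mp this
  · intro h
    have : (' ' :: w).reverse <+: M.reverse := List.reverse_prefix.mpr h
    have h' : w.reverse ++ [' '] <+: M.reverse := by simpa using this
    have := (pv_takeWhile_eq_iff M.reverse w.reverse
      (fun x hx => hsp x (by simpa using hx)) (by simpa using hlen)).mpr h'
    rw [this]; simp

-- a suffix reaching the last element pins the last element
lemma pv_endswith_false_of_getLast (L v : List Char) (c : Char)
    (hlast : L.getLast? = some c) (hv : v ≠ []) (hne : v.getLast? ≠ some c) :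
    PySem.Chars.endswith L v = false := by
  rw [Bool.eq_false_iff]
  intro h
  obtain ⟨u, rfl⟩ := (PySem.Chars.endswith_iff _ _).mp h
  rw [List.getLast?_append_of_ne_nil u hv] at hlast
  exact hne hlast

-- endswith a one-character string is a test on the last element
lemma pv_endswith_singleton (L : List Char) (a : Char) :
    PySem.Chars.endswith L [a] = (L.getLast? == some a) := by
  by_cases h : PySem.Chars.endswith L [a] = true
  · obtain ⟨u, rfl⟩ := (PySem.Chars.endswith_iff _ _).mp h
    rw [h, List.getLast?_append_of_ne_nil u (by simp)]
    simp
  · rw [Bool.not_eq_true] at h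
    rw [h]
    symm
    rw [beq_eq_false_iff_ne]
    intro hl
    rw [Bool.eq_false_iff] at h
    apply h
    rw [PySem.Chars.endswith_iff]
    cases L with
    | nil => simp at hl
    | cons x xs =>
      have hconcat := List.dropLast_concat_getLast (List.cons_ne_nil x xs)
      rw [List.getLast?_eq_some_getLast (by simp)] at hl
      rw [Option.some_inj] at hl
      refine ⟨(x :: xs).dropLast, ?_⟩
      rw [hl] at hconcat
      exact hconcat

-- one trailer of A, rewritten as B's test (under the facts the guards establish)
lemma pv_one_trailer (L w : List Char) (c : Char)
    (hlen : 500 ≤ L.length)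
    (hlast : L.getLast? = some c)
    (hc : c ∈ ['.', '!', '?', '"', '\''])
    (hw : w ≠ [])
    (hsp : ∀ x ∈ w, x ≠ ' ')
    (hlet : ∀ x ∈ w, 'a' ≤ x ∧ x ≤ 'z')
    (hwlen : w.length ≤ 6) :
    (PySem.Chars.endswith L (' ' :: w) || PySem.Chars.endswith L ((' ' :: w) ++ ['.']))
      = (PySem.Chars.endswith L ['.'] && decide (pvLastChunk L.dropLast = w)) := by
  -- the period-free arm never fires: w ends in a lowercase letter, L in punctuation
  have hlow : ∀ d, d ∈ w.getLast? → some d ≠ some c := by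
    intro d hd h
    obtain ⟨hda, hdz⟩ := hlet d (List.mem_of_getLast? hd)
    cases h
    fin_cases hc <;> simp_all [Char.le_def]
  have h1 : PySem.Chars.endswith L (' ' :: w) = false := by
    apply pv_endswith_false_of_getLast L _ c hlast (by simp)
    cases hgl : (' ' :: w).getLast? with
    | none => simp at hgl
    | some d =>
      have : w.getLast? = some d := by
        rw [show (' ' :: w) = [' '] ++ w from rfl, List.getLast?_append_of_ne_nil _ hw] at hgl
        exact hgl
      exact hlow d (by simp [this])
  by_cases hdot : PySem.Chars.endswith L ['.'] = true
  · -- L ends with '.'; peel it off on both sides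
    obtain ⟨u, hu⟩ := (PySem.Chars.endswith_iff _ _).mp hdot
    have hMd : L.dropLast = u := by rw [← hu]; exact List.dropLast_concat
    have hMlen : w.length < L.dropLast.length := by
      have := L.length_dropLast
      omega
    have h2 : PySem.Chars.endswith L ((' ' :: w) ++ ['.'])
        = decide ((' ' :: w) <:+ L.dropLast) := by
      rw [hMd]
      by_cases hs : (' ' :: w) <:+ u
      · simp only [hs, decide_true]
        exact (PySem.Chars.endswith_iff _ _).mpr (by rw [← hu]; exact (pv_suffix_concat_iff _ _ _).mpr hs)
      · simp only [hs, decide_false, Bool.eq_false_iff]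
        intro h
        exact hs ((pv_suffix_concat_iff _ _ _).mp (by rw [hu]; exact (PySem.Chars.endswith_iff _ _).mp h))
    rw [h1, h2, hdot, Bool.false_or, Bool.true_and,
      decide_eq_decide.mpr (pv_lastChunk_eq_iff L.dropLast w hsp hMlen)]
  · -- L does not end with '.': every trailer+'.' arm is false too
    rw [Bool.not_eq_true] at hdot
    have h2 : PySem.Chars.endswith L ((' ' :: w) ++ ['.']) = false := by
      rw [Bool.eq_false_iff]
      intro h
      have hsuf : ['.'] <:+ L :=
        List.IsSuffix.trans (List.suffix_append (' ' :: w) ['.']) ((PySem.Chars.endswith_iff _ _).mp h)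
      rw [Bool.eq_false_iff] at hdot
      exact hdot ((PySem.Chars.endswith_iff _ _).mpr hsuf)
    rw [h1, h2, hdot]
    simp

-- A's fold over a list of trailers versus one membership test
lemma pv_any_trailers (L : List Char) (c : Char)
    (hlen : 500 ≤ L.length)
    (hlast : L.getLast? = some c)
    (hc : c ∈ ['.', '!', '?', '"', '\'']) :
    ∀ (ts : List String),
      (∀ t ∈ ts, t.toList = ' ' :: t.toList.drop 1 ∧ t.toList.drop 1 ≠ [] ∧
        (∀ x ∈ t.toList.drop 1, x ≠ ' ') ∧ (∀ x ∈ t.toList.drop 1, 'a' ≤ x ∧ x ≤ 'z') ∧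
        (t.toList.drop 1).length ≤ 6) →
      (ts.any (fun t => PySem.Chars.endswith L t.toList
                     || PySem.Chars.endswith L (t.toList ++ ['.'])))
        = (PySem.Chars.endswith L ['.']
           && (ts.map (fun t => t.toList.drop 1)).contains (pvLastChunk L.dropLast)) := by
  intro ts hts
  induction ts with
  | nil => simp
  | cons t rest ih =>
    obtain ⟨hshape, hw, hsp, hlet, hwlen⟩ := hts t (by simp)
    have hrest := ih (fun t' ht' => hts t' (by simp [ht']))
    simp only [List.any_cons, List.map_cons, List.contains_cons, hrest]
    rw [hshape]
    rw [pv_one_trailer L (t.toList.drop 1) c hlen hlast hc hw hsp hlet hwlen]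
    cases PySem.Chars.endswith L ['.'] <;>
      simp [Bool.and_or_distrib_left, eq_comm, Bool.beq_eq_decide_eq]

-- ===== VERDICT (by name: the statement is the Claim_ definition above) =====
theorem cover_letter_is_complete_py_spec : Claim_equal_cover_letter_is_complete_py := by
  intro body _
  show cover_letter_is_complete_py body = cover_letter_is_complete_py_alt body
  unfold cover_letter_is_complete_py cover_letter_is_complete_py_alt
  by_cases h0 : body = ""
  · subst h0; rw [if_pos rfl, if_pos (Or.inl (by decide))]
  rw [if_neg h0]
  by_cases h500 : PySem.Str.len (PySem.Str.strip body) < 500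
  · rw [if_pos h500, if_pos (Or.inl h500)]
  by_cases h140 : (PySem.Str.split₀ (PySem.Str.strip body)).length < 140
  · rw [if_neg h500, if_pos h140, if_pos (Or.inr h140)]
  rw [if_neg h500, if_neg h140, if_neg (not_or.mpr ⟨h500, h140⟩)]
  cases hget : PySem.Str.pyGet? (PySem.Str.strip body) (-1) with
  | none => rfl
  | some c =>
    dsimp only
    by_cases hpunct : (['.', '!', '?', '"', '\''].contains c) = true
    swap
    · rw [Bool.not_eq_true] at hpunct
      rw [hpunct]
      simp
    rw [hpunct]
    simp only [Bool.not_true, Bool.false_eq_true, if_false]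
    -- facts for the trailer/chunk lemma
    set S := (PySem.Str.strip body).toList with hS
    have hSlen : 500 ≤ S.length := by
      rw [hS]
      have h := h500
      rw [PySem.Str.len_eq] at h
      omega
    have hSlast : S.getLast? = some c := by
      rw [PySem.Str.pyGet?_eq, PySem.Chars.pyGet?_eq_listPyGet?, PySem.List.pyGet?_neg_one] at hget
      exact hget
    have hcmem : c ∈ ['.', '!', '?', '"', '\''] := by
      simpa using hpunct
    have hlc : PySem.Chars.lowerChar c = c := by
      fin_cases hcmem <;> rfl
    set L := (PySem.Str.lower (PySem.Str.strip body)).toList with hL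
    have hLdef : L = PySem.Chars.lower S := by
      rw [hL, PySem.Str.toList_lower]
    have hLlen : 500 ≤ L.length := by
      rw [hLdef]; unfold PySem.Chars.lower; simpa using hSlen
    have hLlast : L.getLast? = some c := by
      rw [hLdef]; unfold PySem.Chars.lower
      rw [List.getLast?_map, hSlast]
      simp [hlc]
    have key := pv_any_trailers L c hLlen hLlast hcmem pvTrailers
      (by intro t ht; fin_cases ht <;> exact ⟨rfl, by simp, by simp, by simp, by simp⟩)
    have hwords : pvTrailers.map (fun t => t.toList.drop 1) = pvConnectives := by decide
    rw [hwords] at key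
    have hA : (pvTrailers.any (fun t =>
        PySem.Str.endswith (PySem.Str.lower (PySem.Str.strip body)) t
        || PySem.Str.endswith (PySem.Str.lower (PySem.Str.strip body)) (t ++ "."))) =
        (pvTrailers.any (fun t => PySem.Chars.endswith L t.toList
                     || PySem.Chars.endswith L (t.toList ++ ['.'])))  := by
      refine List.any_congr rfl ?_
      intro t
      rw [PySem.Str.endswith_eq, PySem.Str.endswith_eq, hL]
      simp
    -- B's side: the period branch and the chunk
    have hchunk : pvLastChunk L.dropLast
        = PySem.Chars.lower (pvLastChunk S.dropLast) := by
      rw [hLdef, pv_lastChunk_lower]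
    have hdot : PySem.Chars.endswith L ['.'] = (decide (c = '.')) := by
      rw [pv_endswith_singleton, hLlast]
      by_cases hcd : c = '.' <;> simp [hcd]
    rw [hA, key, hdot, hchunk]
    by_cases hcd : c = '.' <;>
      cases hm : pvConnectives.contains (PySem.Chars.lower (pvLastChunk S.dropLast)) <;>
      simp [hcd]
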